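-- pv_equiv track=rewrite | github.com/timtutu2/dexwm_basdline | models/model.py | blockwise_spatial_mask
-- ===== SOURCE A (Python) =====
-- def blockwise_spatial_mask(b, h, q_idx, kv_idx, num_frames=5, num_tokens=196):
--     n = num_tokens
--
--     # Iterate over frames
--     for i in range(num_frames):
--
--         start_i = i * n
--         end_i = (i+1) * n
--         q_mask_1 = start_i <= q_idx
--         q_mask_2 = q_idx < end_i
--         q_mask = q_mask_1 &  q_mask_2
--
--         kv_idx_1 = start_i <= kv_idx
--         kv_idx_2 = kv_idx < end_i
--         kv_mask = kv_idx_1 & kv_idx_2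
--
--         curr_m = q_mask * kv_mask
--
--         if i == 0:
--             m = curr_m
--         else:
--             m = m | curr_m
--     return m
-- ===== SOURCE B (Python) =====
-- def blockwise_spatial_mask(b, h, q_idx, kv_idx, num_frames=5, num_tokens=196):
--     # Closed form: same frame block iff q_idx//n == kv_idx//n, with that block in range.
--     n = num_tokens
--     if n <= 0:
--         return 0
--     fq = q_idx // n
--     return 1 if 0 <= fq < num_frames and fq == kv_idx // n else 0
-- ===== Notes on version B (the rewrite author's own statement) =====
-- stated objective: faster
-- what changed: Replaced the loop over all frames with a closed-form O(1) test: the block index q_idx//num_tokens must be in range and equal kv_idx//num_tokens.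
import Mathlib
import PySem

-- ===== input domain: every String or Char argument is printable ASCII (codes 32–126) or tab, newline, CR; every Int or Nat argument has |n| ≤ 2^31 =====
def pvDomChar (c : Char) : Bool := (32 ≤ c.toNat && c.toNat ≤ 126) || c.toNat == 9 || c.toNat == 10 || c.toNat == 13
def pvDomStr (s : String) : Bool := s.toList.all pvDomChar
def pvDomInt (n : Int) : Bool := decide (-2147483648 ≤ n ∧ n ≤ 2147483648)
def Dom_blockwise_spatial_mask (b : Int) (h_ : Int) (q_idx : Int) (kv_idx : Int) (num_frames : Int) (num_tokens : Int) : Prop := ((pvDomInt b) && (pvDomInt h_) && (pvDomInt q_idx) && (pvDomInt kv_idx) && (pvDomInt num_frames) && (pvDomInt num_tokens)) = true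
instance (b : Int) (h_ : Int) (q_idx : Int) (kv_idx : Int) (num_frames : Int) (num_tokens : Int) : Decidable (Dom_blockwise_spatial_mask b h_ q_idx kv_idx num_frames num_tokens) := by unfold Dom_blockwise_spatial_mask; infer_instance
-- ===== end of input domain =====

-- B replaces A's loop over frames by an O(1) closed-form block-index test (return value equivalence).

-- ===== PORT A =====
-- loop body of A's 'for i in range(num_frames)'; m is the running mask (0 before frame 0 is processed)
def bsmBody (q_idx kv_idx num_tokens : Int) (m i : Int) : Int :=
  let start_i := i * num_tokens
  let end_i := (i + 1) * num_tokens
  let q_mask : Int := if start_i ≤ q_idx ∧ q_idx < end_i then 1 else 0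
  let kv_mask : Int := if start_i ≤ kv_idx ∧ kv_idx < end_i then 1 else 0
  let curr_m := q_mask * kv_mask
  if i == 0 then curr_m else PySem.Int.bor m curr_m

def blockwise_spatial_mask (b : Int) (h_ : Int) (q_idx : Int) (kv_idx : Int) (num_frames : Int) (num_tokens : Int) : Int :=
  (PySem.List.pyRange 0 num_frames 1).foldl (bsmBody q_idx kv_idx num_tokens) 0

-- ===== PORT B =====
def blockwise_spatial_mask_alt (b : Int) (h_ : Int) (q_idx : Int) (kv_idx : Int) (num_frames : Int) (num_tokens : Int) : Int :=
  if num_tokens ≤ 0 then 0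
  else
    let fq := PySem.Int.floordiv q_idx num_tokens
    if 0 ≤ fq ∧ fq < num_frames ∧ fq = PySem.Int.floordiv kv_idx num_tokens then 1 else 0

-- ===== PRECONDITION & SPEC =====
-- A's loop body never runs when num_frames ≤ 0, so 'return m' raises NameError; Pre_ excludes that.
def Pre_blockwise_spatial_mask (b : Int) (h_ : Int) (q_idx : Int) (kv_idx : Int) (num_frames : Int) (num_tokens : Int) : Prop := 1 ≤ num_frames
instance (b : Int) (h_ : Int) (q_idx : Int) (kv_idx : Int) (num_frames : Int) (num_tokens : Int) : Decidable (Pre_blockwise_spatial_mask b h_ q_idx kv_idx num_frames num_tokens) := by unfold Pre_blockwise_spatial_mask; infer_instance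

def pvWitness_blockwise_spatial_mask : Int × Int × Int × Int × Int × Int := (0, 0, 200, 250, 5, 196)


def Spec_blockwise_spatial_mask (b : Int) (h_ : Int) (q_idx : Int) (kv_idx : Int) (num_frames : Int) (num_tokens : Int) (out : Int) : Prop := out = blockwise_spatial_mask_alt b h_ q_idx kv_idx num_frames num_tokens
instance (b : Int) (h_ : Int) (q_idx : Int) (kv_idx : Int) (num_frames : Int) (num_tokens : Int) (out : Int) : Decidable (Spec_blockwise_spatial_mask b h_ q_idx kv_idx num_frames num_tokens out) := by unfold Spec_blockwise_spatial_mask; infer_instance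

-- ===== CLAIM (what is proved, stated in full; the proofs are below) =====
def Claim_equal_blockwise_spatial_mask : Prop := ∀ (b : Int) (h_ : Int) (q_idx : Int) (kv_idx : Int) (num_frames : Int) (num_tokens : Int), Dom_blockwise_spatial_mask b h_ q_idx kv_idx num_frames num_tokens → Pre_blockwise_spatial_mask b h_ q_idx kv_idx num_frames num_tokens → Spec_blockwise_spatial_mask b h_ q_idx kv_idx num_frames num_tokens (blockwise_spatial_mask b h_ q_idx kv_idx num_frames num_tokens)


-- ===== LEMMAS AND PROOFS =====

-- one frame's contribution: for 0 < nt it is the indicator of 'both indices in block i'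
lemma bsm_curr_pos (q kv nt i : Int) (hnt : 0 < nt) :
    ((if i * nt ≤ q ∧ q < (i + 1) * nt then (1:Int) else 0) * (if i * nt ≤ kv ∧ kv < (i + 1) * nt then (1:Int) else 0))
    = (if PySem.Int.floordiv q nt = i ∧ PySem.Int.floordiv kv nt = i then (1:Int) else 0) := by
  simp only [PySem.Int.floordiv_eq_iff_of_pos hnt]
  split_ifs with h1 h2 h3 <;> simp_all

-- loop invariant: after processing frames 0..k-1 (k ≥ 1), m is the indicator of 'blocks match and in range'
lemma bsm_loop (q kv nt : Int) (k : Nat) (hk : 1 ≤ k) :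
    (PySem.List.pyRange 0 (k : Int) 1).foldl (bsmBody q kv nt) 0 =
    (if 0 < nt ∧ 0 ≤ PySem.Int.floordiv q nt ∧ PySem.Int.floordiv q nt < (k : Int) ∧
        PySem.Int.floordiv q nt = PySem.Int.floordiv kv nt then (1:Int) else 0) := by
  induction k with
  | zero => omega
  | succ k ih =>
    by_cases hk1 : k = 0
    · subst hk1
      rw [show ((1:Nat) : Int) = (0:Int) + 1 by norm_num, PySem.List.pyRange_one_singleton]
      simp only [List.foldl, bsmBody]
      by_cases hnt : 0 < nt
      · rw [bsm_curr_pos q kv nt 0 hnt]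
        simp only [beq_self_eq_true, if_true]
        split_ifs with h1 h2 h2 <;> first | rfl | (exfalso; omega)
      · have hq : ¬ ((0:Int) * nt ≤ q ∧ q < (0 + 1) * nt) := by
          push_neg; intro h; nlinarith
        simp only [beq_self_eq_true, if_true, if_neg hq, zero_mul]
        split_ifs with h <;> first | rfl | (exfalso; omega)
    · have hk' : 1 ≤ k := by omega
      have hsplit : (((k+1 : Nat)) : Int) = (k : Int) + 1 := by push_cast; ring
      rw [hsplit, PySem.List.pyRange_one_succ_right (by positivity), List.foldl_append, ih hk']
      simp only [List.foldl]
      have hkne : ((k : Int) == 0) = false := by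
        simp only [beq_eq_false_iff_ne, ne_eq]
        exact_mod_cast hk1
      by_cases hnt : 0 < nt
      · simp only [bsmBody, hkne, if_false]
        rw [bsm_curr_pos q kv nt (k : Int) hnt]
        split_ifs with h1 h2 h3 h3 h3 h3 <;> first | decide | (exfalso; omega)
      · have hq : ¬ ((k : Int) * nt ≤ q ∧ q < ((k : Int) + 1) * nt) := by
          push_neg; intro h; nlinarith
        simp only [bsmBody, hkne, if_false, if_neg hq, zero_mul]
        split_ifs with h1 h2 h2 <;> first | decide | (exfalso; omega)

-- ===== VERDICT (by name: the statement is the Claim_ definition above) =====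
theorem blockwise_spatial_mask_spec : Claim_equal_blockwise_spatial_mask := by
  intro b h_ q kv nf nt _ hpre
  unfold Pre_blockwise_spatial_mask at hpre
  unfold Spec_blockwise_spatial_mask blockwise_spatial_mask blockwise_spatial_mask_alt
  have hnf : nf = ((nf.toNat : Nat) : Int) := by omega
  have hk : 1 ≤ nf.toNat := by omega
  rw [hnf, bsm_loop q kv nt nf.toNat hk]
  dsimp only
  split_ifs <;> omega
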